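-- pv_equiv track=rewrite | github.com/4ndy1e/codepath | unit10/standard.py | get_all_destinations
-- ===== SOURCE A (Python) =====
-- from collections import deque
--
-- def get_all_destinations(flights, start):
--     queue = deque()
--     queue.append(start)
--     visited = set()
--
--     reachable = []
--
--     while queue:
--         currentDestination = queue.popleft()
--
--         visited.add(currentDestination)
--         reachable.append(currentDestination)
--
--         for destination in flights.get(currentDestination, []):
--             if destination not in visited:
--                 queue.append(destination)
--
--     return reachable
-- ===== SOURCE B (Python) =====
-- def get_all_destinations(flights, start):
--     # Level-order BFS: process one whole frontier at a time instead of a queue.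
--     # visited is updated incrementally while walking the frontier, so neighbour
--     # checks see earlier nodes of the same level, exactly like pop-time marking.
--     visited = set()
--     reachable = []
--     frontier = [start]
--     while frontier:
--         next_frontier = []
--         for node in frontier:
--             visited.add(node)
--             reachable.append(node)
--             for dest in flights.get(node, []):
--                 if dest not in visited:
--                     next_frontier.append(dest)
--         frontier = next_frontier
--     return reachable
-- ===== Notes on version B (the rewrite author's own statement) =====
-- stated objective: alternative
-- what changed: A's single deque with pop-time marking is re-decomposed into level-order BFS: an outer while over whole frontiers and an inner pass that builds next_frontier per level, with visited updated incrementally along the frontier.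
import Mathlib
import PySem

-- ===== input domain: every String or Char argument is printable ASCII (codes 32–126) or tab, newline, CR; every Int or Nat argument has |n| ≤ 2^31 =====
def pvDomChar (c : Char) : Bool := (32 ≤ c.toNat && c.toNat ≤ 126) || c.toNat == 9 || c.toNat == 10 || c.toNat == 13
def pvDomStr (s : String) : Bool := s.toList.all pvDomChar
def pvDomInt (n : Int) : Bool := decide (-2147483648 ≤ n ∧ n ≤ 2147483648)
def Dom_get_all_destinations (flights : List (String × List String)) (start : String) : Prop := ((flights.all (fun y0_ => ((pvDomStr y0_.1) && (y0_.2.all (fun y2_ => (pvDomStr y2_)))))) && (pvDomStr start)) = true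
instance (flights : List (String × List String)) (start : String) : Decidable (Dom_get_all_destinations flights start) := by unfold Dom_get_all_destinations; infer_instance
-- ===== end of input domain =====

-- B replaces A's single deque (pop-time processing) by level-order BFS over whole
-- frontiers (alternative decomposition, same cost); equality of return values is proved.

-- ===== PORT A =====
-- fuel bound for the while-loop (the loop always terminates; the bound is generous)
def pvFuel (flights : List (String × List String)) : Nat :=
  let e := flights.foldl (fun n kv => n + kv.2.length) 1
  (e + 1) ^ (2 * e + 4)

-- `while queue:` of A, one fuel unit per popleft
def pvALoop (flights : List (String × List String)) :
    Nat → List String → PySem.Set String → List String → List String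
  | _, [], _, reachable => reachable
  | 0, _ :: _, _, reachable => reachable
  | fuel + 1, current :: queue, visited, reachable =>
      let visited' := PySem.Set.add visited current
      let reachable' := reachable ++ [current]
      let queue' := ((PySem.Dict.mk flights).getD current []).foldl
          (fun q d => if !(PySem.Set.contains visited' d) then q ++ [d] else q) queue
      pvALoop flights fuel queue' visited' reachable'

def get_all_destinations (flights : List (String × List String)) (start : String) : List String :=
  pvALoop flights (pvFuel flights) [start] PySem.Set.empty []

-- ===== PORT B =====
-- B's nested loops as one recursion over the pair (frontier, next_frontier):
-- each fuel unit processes the next frontier node; the `[], d :: rest` equation is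
-- B's `frontier = next_frontier` swap fused with processing the new frontier's head.
def pvBLoop (flights : List (String × List String)) :
    Nat → List String → List String → PySem.Set String → List String → List String
  | _, [], [], _, reachable => reachable
  | 0, _, _, _, reachable => reachable
  | fuel + 1, [], d :: rest, visited, reachable =>
      -- frontier exhausted: frontier := next_frontier; process its head d
      let visited' := PySem.Set.add visited d
      let reachable' := reachable ++ [d]
      let nxt' := ((PySem.Dict.mk flights).getD d []).foldl
          (fun nf e => if !(PySem.Set.contains visited' e) then nf ++ [e] else nf) []
      pvBLoop flights fuel rest nxt' visited' reachable'
  | fuel + 1, node :: front, nxt, visited, reachable =>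
      let visited' := PySem.Set.add visited node
      let reachable' := reachable ++ [node]
      let nxt' := ((PySem.Dict.mk flights).getD node []).foldl
          (fun nf e => if !(PySem.Set.contains visited' e) then nf ++ [e] else nf) nxt
      pvBLoop flights fuel front nxt' visited' reachable'

def get_all_destinations_alt (flights : List (String × List String)) (start : String) : List String :=
  pvBLoop flights (pvFuel flights) [start] [] PySem.Set.empty []

-- ===== PRECONDITION & SPEC =====
def Spec_get_all_destinations (flights : List (String × List String)) (start : String) (out : List String) : Prop := out = get_all_destinations_alt flights start
instance (flights : List (String × List String)) (start : String) (out : List String) : Decidable (Spec_get_all_destinations flights start out) := by unfold Spec_get_all_destinations; infer_instance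

-- ===== CLAIM (what is proved, stated in full; the proofs are below) =====
def Claim_equal_get_all_destinations : Prop := ∀ (flights : List (String × List String)) (start : String), Dom_get_all_destinations flights start → Spec_get_all_destinations flights start (get_all_destinations flights start)

-- ===== LEMMAS AND PROOFS =====

-- both inner folds of conditional appends build `prefix ++ filtered batch`
lemma pvFold_filter (p : String → Bool) :
    ∀ (l q0 : List String),
      l.foldl (fun q d => if p d then q ++ [d] else q) q0 = q0 ++ l.filter p := by
  intro l
  induction l with
  | nil => intro q0; simp
  | cons a t ih =>
      intro q0
      cases hp : p a <;> simp [List.foldl, hp, ih]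

-- lockstep: A's queue is exactly B's frontier followed by B's next_frontier
lemma pvLoop_eq (flights : List (String × List String)) :
    ∀ (fuel : Nat) (front nxt : List String)
      (visited : PySem.Set String) (reachable : List String),
      pvALoop flights fuel (front ++ nxt) visited reachable
        = pvBLoop flights fuel front nxt visited reachable := by
  intro fuel
  induction fuel with
  | zero =>
      intro front nxt visited reachable
      match front, nxt with
      | [], [] => simp [pvALoop, pvBLoop]
      | [], d :: rest => simp [pvALoop, pvBLoop]
      | node :: f, nxt => simp [pvALoop, pvBLoop]
  | succ fuel ih =>
      intro front nxt visited reachable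
      match front, nxt with
      | [], [] => simp [pvALoop, pvBLoop]
      | [], d :: rest =>
          simp only [List.nil_append, pvALoop, pvBLoop]
          rw [pvFold_filter, pvFold_filter, List.nil_append, ← ih]
      | node :: f, nxt =>
          simp only [List.cons_append, pvALoop, pvBLoop]
          rw [pvFold_filter, pvFold_filter, List.append_assoc, ← ih]

-- ===== VERDICT (by name: the statement is the Claim_ definition above) =====
theorem get_all_destinations_spec : Claim_equal_get_all_destinations := by
  intro flights start _
  unfold Spec_get_all_destinations get_all_destinations get_all_destinations_alt
  have := pvLoop_eq flights (pvFuel flights) [start] [] PySem.Set.empty []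
  simpa using this
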